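-- pv_equiv track=rewrite | github.com/Anantlok/Logic-Questions | 1356-sort-integers-by-the-number-of-1-bits/1356-sort-integers-by-the-number-of-1-bits.py | sortByBits
-- ===== SOURCE A (Python) =====
-- from typing import List
--
-- def sortByBits(arr: List[int]) -> List[int]:
--     def counter(st):
--         dic={}
--         for i in st:
--             dic[i]=dic.get(i,0)+1
--         if dic.get('1',0)==0:
--             return 0
--         return dic['1']
--     lis=[]
--     for i in arr:
--         lis.append([i,counter(bin(i))])
--     lis.sort(key=lambda x:(x[1],x[0]))
--     arr2=[x[0] for x in lis]
--     return arr2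
-- ===== SOURCE B (Python) =====
-- from typing import List
--
-- def _popcount(n):
--     c = 0
--     while n:
--         c += n & 1
--         n >>= 1
--     return c
--
-- def sortByBits(arr: List[int]) -> List[int]:
--     buckets = {}
--     for x in arr:
--         buckets.setdefault(_popcount(abs(x)), []).append(x)
--     res = []
--     for c in sorted(buckets):
--         res.extend(sorted(buckets[c]))
--     return res
-- ===== Notes on version B (the rewrite author's own statement) =====
-- stated objective: faster
-- what changed: B replaces A's decorate-with-a-char-counter-dict, global (count,value)-keyed sort, undecorate pipeline by one grouping pass into popcount-indexed buckets (popcount via a bit loop instead of counting '1' characters of bin(i) with a dict), then sorts each bucket by plain value and concatenates buckets in increasing popcount order.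
import Mathlib
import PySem

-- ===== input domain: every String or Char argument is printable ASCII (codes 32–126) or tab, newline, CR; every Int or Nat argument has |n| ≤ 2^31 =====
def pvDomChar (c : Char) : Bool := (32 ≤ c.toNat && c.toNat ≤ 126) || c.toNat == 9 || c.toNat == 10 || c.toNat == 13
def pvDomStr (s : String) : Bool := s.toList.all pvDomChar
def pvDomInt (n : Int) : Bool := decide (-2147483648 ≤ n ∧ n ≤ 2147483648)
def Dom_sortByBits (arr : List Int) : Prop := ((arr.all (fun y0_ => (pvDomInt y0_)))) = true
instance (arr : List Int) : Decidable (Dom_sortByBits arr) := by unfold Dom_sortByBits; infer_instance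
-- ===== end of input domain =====

-- B groups values into popcount buckets (bit loop) and concatenates per-bucket value
-- sorts in increasing popcount order, instead of A's decorate/global-sort/undecorate
-- with a char-counting dict over bin(i); same results, a different-shaped pass.

-- ===== PORT A =====

-- Python's bin(n) for n ≥ 1: most-significant-first binary digits.
def pyBinDigits (n : Nat) : List Char :=
  if h : n = 0 then [] else pyBinDigits (n / 2) ++ [if n % 2 = 1 then '1' else '0']
decreasing_by exact Nat.div_lt_self (Nat.pos_of_ne_zero h) one_lt_two

-- Python's bin(i) as a character list: '-' sign, '0b' prefix, digits ('0b0' for 0).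
def pyBin (i : Int) : List Char :=
  (if i < 0 then ['-'] else []) ++ '0' :: 'b' :: (if i.natAbs = 0 then ['0'] else pyBinDigits i.natAbs)

-- A's 'counter': a char-frequency dict, then dic.get('1',0)==0 test and dic['1'];
-- the guard ensures '1' is present in the dict there, so dic['1'] = getD '1' 0.
def counterA (st : List Char) : Int :=
  let dic := st.foldl (fun d c => d.insert c (d.getD c 0 + 1)) (PySem.Dict.empty : PySem.Dict Char Int)
  if dic.getD '1' 0 == 0 then 0 else dic.getD '1' 0

def sortByBits (arr : List Int) : List Int :=
  let lis := arr.foldl (fun acc i => acc ++ [(i, counterA (pyBin i))]) ([] : List (Int × Int))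
  let lis2 := PySem.List.sorted2 lis (fun x => x.2) (fun x => x.1) false
  lis2.map (fun x => x.1)

-- ===== PORT B =====

-- Source B's _popcount: while n: c += n & 1; n >>= 1.
def popcount (n : Nat) : Nat :=
  if h : n = 0 then 0 else (n % 2) + popcount (n / 2)
decreasing_by exact Nat.div_lt_self (Nat.pos_of_ne_zero h) one_lt_two

def sortByBits_alt (arr : List Int) : List Int :=
  let buckets := arr.foldl
    (fun d x => d.modify ((popcount x.natAbs : Int)) [] (fun l => l ++ [x]))
    (PySem.Dict.empty : PySem.Dict Int (List Int))
  (PySem.List.sorted buckets.keys (fun k => k) false).foldl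
    (fun res c => res ++ PySem.List.sorted (buckets.getD c []) (fun v => v) false) []

-- ===== PRECONDITION & SPEC =====
def Spec_sortByBits (arr : List Int) (out : List Int) : Prop := out = sortByBits_alt arr
instance (arr : List Int) (out : List Int) : Decidable (Spec_sortByBits arr out) := by unfold Spec_sortByBits; infer_instance

-- ===== CLAIM (what is proved, stated in full; the proofs are below) =====
def Claim_equal_sortByBits : Prop := ∀ (arr : List Int), Dom_sortByBits arr → Spec_sortByBits arr (sortByBits arr)

-- ===== LEMMAS AND PROOFS =====

-- The shared key: popcount of |i|, as an Int (A computes it by counting '1' chars of bin(i)).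
def pcI (i : Int) : Int := (popcount i.natAbs : Int)

-- The (popcount, value) ordering both programs realise.
def rKey (a b : Int) : Prop := pcI a < pcI b ∨ (pcI a = pcI b ∧ a ≤ b)

theorem count_pyBinDigits (n : Nat) : (pyBinDigits n).count '1' = popcount n := by
  induction n using pyBinDigits.induct with
  | case1 => simp [pyBinDigits, popcount]
  | case2 n h ih =>
    rw [pyBinDigits, popcount, dif_neg h, dif_neg h, List.count_append, ih]
    rcases Nat.mod_two_eq_zero_or_one n with h2 | h2 <;> simp [h2] <;> omega

theorem count_pyBin (i : Int) : (pyBin i).count '1' = popcount i.natAbs := by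
  unfold pyBin
  rcases eq_or_ne i.natAbs 0 with h0 | h0
  · rw [h0, if_pos rfl]
    have : popcount 0 = 0 := by simp [popcount]
    rw [this]
    split <;> simp
  · rw [if_neg h0]
    split <;> simp [count_pyBinDigits]

theorem counterA_pyBin (i : Int) : counterA (pyBin i) = pcI i := by
  unfold counterA pcI
  have h := PySem.Dict.getD_foldl_insert_add_one (pyBin i) PySem.Dict.empty '1'
  simp only [PySem.Dict.getD_empty, zero_add] at h
  simp only [h]
  have hc := count_pyBin i
  split
  next hcond => simp only [beq_iff_eq] at hcond; omega
  next => omega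

-- ---------- A's side: output is a permutation of arr, pairwise rKey ----------

-- the comparator sorted2 uses for keys (·.2, ·.1), reverse = false
def beforeA (p q : Int × Int) : Bool :=
  decide (p.2 < q.2) || (!decide (q.2 < p.2) && decide (p.1 < q.1))

def rp (p q : Int × Int) : Prop := p.2 < q.2 ∨ (p.2 = q.2 ∧ p.1 ≤ q.1)

theorem rp_of_not_beforeA {p q : Int × Int} (h : ¬ beforeA q p = true) : rp p q := by
  unfold beforeA at h; unfold rp
  simp only [Bool.or_eq_true, Bool.and_eq_true, Bool.not_eq_true', decide_eq_true_eq,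
    decide_eq_false_iff_not, not_or, not_and] at h
  omega

theorem rp_of_beforeA {p q : Int × Int} (h : beforeA p q = true) : rp p q := by
  unfold beforeA at h; unfold rp
  simp only [Bool.or_eq_true, Bool.and_eq_true, Bool.not_eq_true', decide_eq_true_eq,
    decide_eq_false_iff_not] at h
  omega

theorem rp_trans {p q r : Int × Int} (h1 : rp p q) (h2 : rp q r) : rp p r := by
  unfold rp at *; omega

theorem pairwise_insertBy_beforeA (x : Int × Int) (ys : List (Int × Int))
    (h : ys.Pairwise rp) : (PySem.List.insertBy beforeA x ys).Pairwise rp := by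
  induction ys with
  | nil => simp [PySem.List.insertBy]
  | cons y ys ih =>
    rw [List.pairwise_cons] at h
    by_cases hb : beforeA x y = true
    · rw [PySem.List.insertBy, if_pos hb]
      refine List.Pairwise.cons ?_ (List.Pairwise.cons h.1 h.2)
      intro z hz
      rcases List.mem_cons.1 hz with rfl | hz
      · exact rp_of_beforeA hb
      · exact rp_trans (rp_of_beforeA hb) (h.1 z hz)
    · rw [PySem.List.insertBy, if_neg hb]
      refine List.Pairwise.cons ?_ (ih h.2)
      intro z hz
      rcases (PySem.List.mem_insertBy beforeA x z ys).1 hz with rfl | hz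
      · exact rp_of_not_beforeA hb
      · exact h.1 z hz

theorem pairwise_foldl_insertBy_beforeA (l acc : List (Int × Int))
    (h : acc.Pairwise rp) :
    (l.foldl (fun a x => PySem.List.insertBy beforeA x a) acc).Pairwise rp := by
  induction l generalizing acc with
  | nil => exact h
  | cons x l ih => exact ih _ (pairwise_insertBy_beforeA x acc h)

theorem sorted2_eq_foldl (xs : List (Int × Int)) :
    PySem.List.sorted2 xs (fun x => x.2) (fun x => x.1) false
      = xs.foldl (fun a x => PySem.List.insertBy beforeA x a) [] := rfl

theorem sortByBits_eq (arr : List Int) :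
    sortByBits arr
      = (PySem.List.sorted2 (arr.map (fun i => (i, pcI i))) (fun x => x.2) (fun x => x.1) false).map
          (fun x => x.1) := by
  unfold sortByBits
  rw [PySem.List.foldl_append_singleton_eq_map]
  simp only [List.nil_append]
  congr 2
  exact List.map_congr_left (fun i _ => by rw [counterA_pyBin])

theorem A_perm (arr : List Int) : (sortByBits arr).Perm arr := by
  rw [sortByBits_eq]
  have h := (PySem.List.sorted2_perm (arr.map (fun i => (i, pcI i)))
    (fun x => x.2) (fun x => x.1) false).map (fun x : Int × Int => x.1)
  simpa [Function.comp_def] using h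

theorem A_pairwise (arr : List Int) : (sortByBits arr).Pairwise rKey := by
  rw [sortByBits_eq]
  set lis := arr.map (fun i => (i, pcI i)) with hlis
  have hsorted : (PySem.List.sorted2 lis (fun x => x.2) (fun x => x.1) false).Pairwise rp := by
    rw [sorted2_eq_foldl]
    exact pairwise_foldl_insertBy_beforeA lis [] (List.Pairwise.nil)
  rw [List.pairwise_map]
  refine List.Pairwise.imp_of_mem ?_ hsorted
  intro p q hp hq hpq
  have hp' : p ∈ lis := (PySem.List.sorted2_perm lis _ _ false).mem_iff.1 hp
  have hq' : q ∈ lis := (PySem.List.sorted2_perm lis _ _ false).mem_iff.1 hq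
  rw [hlis, List.mem_map] at hp' hq'
  obtain ⟨a, _, rfl⟩ := hp'
  obtain ⟨b, _, rfl⟩ := hq'
  unfold rp at hpq; unfold rKey
  exact hpq

-- ---------- B's side ----------

theorem buckets_getD (arr : List Int) (c : Int) :
    (arr.foldl (fun d x => d.modify ((popcount x.natAbs : Int)) [] (fun l => l ++ [x]))
      (PySem.Dict.empty : PySem.Dict Int (List Int))).getD c []
      = arr.filter (fun x => pcI x == c) := by
  have h1 : arr.foldl (fun d x => d.modify ((popcount x.natAbs : Int)) [] (fun l => l ++ [x]))
      (PySem.Dict.empty : PySem.Dict Int (List Int))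
      = (arr.map (fun x => (pcI x, x))).foldl
          (fun d p => d.modify p.1 [] (fun l => l ++ [p.2])) PySem.Dict.empty := by
    rw [List.foldl_map]; rfl
  rw [h1, PySem.Dict.getD_foldl_modify_append]
  simp [List.filter_map, Function.comp_def, List.map_map]

theorem buckets_keys (arr : List Int) :
    (arr.foldl (fun d x => d.modify ((popcount x.natAbs : Int)) [] (fun l => l ++ [x]))
      (PySem.Dict.empty : PySem.Dict Int (List Int))).keys
      = PySem.Set.ofList (arr.map pcI) := by
  have h := PySem.Dict.keys_foldl_modify_key arr (fun x => pcI x) ([] : List Int)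
    (fun _ x => fun l => l ++ [x]) (PySem.Dict.empty : PySem.Dict Int (List Int))
  simp only [PySem.Dict.keys_empty] at h
  rw [show (fun (d : PySem.Dict Int (List Int)) (x : Int) =>
        d.modify ((popcount x.natAbs : Int)) [] (fun l => l ++ [x]))
      = (fun d x => d.modify (pcI x) [] ((fun _ x => fun l => l ++ [x]) d x)) from rfl, h]
  rw [PySem.Set.update_nil_left]

theorem sortByBits_alt_eq (arr : List Int) :
    sortByBits_alt arr
      = (PySem.List.sorted (PySem.Set.ofList (arr.map pcI)) (fun k => k) false).flatMap
          (fun c => PySem.List.sorted (arr.filter (fun x => pcI x == c)) (fun v => v) false) := by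
  unfold sortByBits_alt
  simp only [buckets_keys, buckets_getD]
  rw [PySem.List.foldl_append_eq_flatMap]
  simp

theorem B_pairwise (arr : List Int) : (sortByBits_alt arr).Pairwise rKey := by
  rw [sortByBits_alt_eq, List.flatMap_def, List.pairwise_flatten]
  constructor
  · intro l hl
    rw [List.mem_map] at hl
    obtain ⟨c, _, rfl⟩ := hl
    have hs := PySem.List.sorted_pairwise (arr.filter (fun x => pcI x == c)) (fun v => v)
    refine List.Pairwise.imp_of_mem ?_ hs
    intro a b ha hb hab
    have ha' := (PySem.List.mem_sorted (xs := arr.filter (fun x => pcI x == c))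
      (key := fun v => v) (rev := false) (x := a)).1 ha
    have hb' := (PySem.List.mem_sorted (xs := arr.filter (fun x => pcI x == c))
      (key := fun v => v) (rev := false) (x := b)).1 hb
    have hac : pcI a = c := by simpa using (List.mem_filter.1 ha').2
    have hbc : pcI b = c := by simpa using (List.mem_filter.1 hb').2
    exact Or.inr ⟨hac.trans hbc.symm, hab⟩
  · rw [List.pairwise_map]
    refine List.Pairwise.imp ?_ (PySem.List.sorted_ofList_pairwise_lt (arr.map pcI))
    intro c c' hcc' a ha b hb
    have ha' := (PySem.List.mem_sorted (xs := arr.filter (fun x => pcI x == c))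
      (key := fun v => v) (rev := false) (x := a)).1 ha
    have hb' := (PySem.List.mem_sorted (xs := arr.filter (fun x => pcI x == c'))
      (key := fun v => v) (rev := false) (x := b)).1 hb
    have hac : pcI a = c := by simpa using (List.mem_filter.1 ha').2
    have hbc : pcI b = c' := by simpa using (List.mem_filter.1 hb').2
    exact Or.inl (by omega)

theorem partition_perm (ks : List Int) :
    ∀ (l : List Int), ks.Nodup → (∀ x ∈ l, pcI x ∈ ks) →
    (ks.flatMap (fun c => PySem.List.sorted (l.filter (fun x => pcI x == c)) (fun v => v) false)).Perm l := by
  induction ks with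
  | nil =>
    intro l _ hcov
    cases l with
    | nil => simp
    | cons x xs => exact absurd (hcov x (List.mem_cons_self)) (List.not_mem_nil)
  | cons c ks ih =>
    intro l hnd hcov
    rw [List.flatMap_cons]
    have hnd' := (List.nodup_cons.1 hnd)
    have hrest : ks.flatMap (fun c' => PySem.List.sorted (l.filter (fun x => pcI x == c')) (fun v => v) false)
        = ks.flatMap (fun c' => PySem.List.sorted
            ((l.filter (fun x => !(pcI x == c))).filter (fun x => pcI x == c')) (fun v => v) false) := by
      apply List.flatMap_congr
      intro c' hc'
      congr 1
      rw [List.filter_filter]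
      apply List.filter_congr
      intro x _
      have hne : c' ≠ c := fun h => hnd'.1 (h ▸ hc')
      by_cases hx : pcI x = c'
      · simp [hx, hne]
      · simp [hx]
    rw [hrest]
    have hcov' : ∀ x ∈ l.filter (fun x => !(pcI x == c)), pcI x ∈ ks := by
      intro x hx
      obtain ⟨hxl, hxc⟩ := List.mem_filter.1 hx
      have := hcov x hxl
      rcases List.mem_cons.1 this with h | h
      · simp [h] at hxc
      · exact h
    have hih := ih (l.filter (fun x => !(pcI x == c))) hnd'.2 hcov'
    have hchunk := PySem.List.sorted_perm (l.filter (fun x => pcI x == c)) (fun v : Int => v) false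
    exact (hchunk.append hih).trans (List.filter_append_perm _ l)

theorem B_perm (arr : List Int) : (sortByBits_alt arr).Perm arr := by
  rw [sortByBits_alt_eq]
  apply partition_perm
  · exact ((PySem.List.sorted_ofList_pairwise_lt (arr.map pcI)).imp (fun h => ne_of_lt h))
  · intro x hx
    rw [PySem.List.mem_sorted, PySem.Set.mem_ofList]
    exact List.mem_map.2 ⟨x, hx, rfl⟩

-- ===== VERDICT (by name: the statement is the Claim_ definition above) =====
theorem sortByBits_spec : Claim_equal_sortByBits := by
  intro arr _
  unfold Spec_sortByBits
  refine List.eq_of_perm_of_sorted ?_ (A_pairwise arr) (B_pairwise arr)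
    ((A_perm arr).trans (B_perm arr).symm)
  intro a b _ _ hab hba
  unfold rKey at hab hba; omega
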